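-- pv_equiv track=rewrite | github.com/CarlosZamora14/hackerrank-problems | python/designer-door-mat.py | design_doormat
-- ===== SOURCE A (Python) =====
-- def design_doormat(n: int, m: int) -> str:
--     doormat = [None] * n
--
--     for row_number in range(n // 2):
--         ends = '-' * ((m - 3 * (2 * row_number + 1)) // 2)
--         middle = '.|.' * (2 * row_number + 1)
--         full_row = ends + middle + ends
--
--         doormat[row_number] = full_row
--         doormat[n - (row_number + 1)] = full_row
--
--     doormat[n // 2] = 'WELCOME'.center(m, '-')
--
--     return '\n'.join(doormat)
-- ===== SOURCE B (Python) =====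
-- def design_doormat(n: int, m: int) -> str:
--     def row(i):
--         if i == n // 2:
--             return 'WELCOME'.center(m, '-')
--         k = min(i, n - 1 - i)
--         ends = '-' * ((m - 3 * (2 * k + 1)) // 2)
--         return ends + '.|.' * (2 * k + 1) + ends
--     return '\n'.join(row(i) for i in range(n))
-- ===== Notes on version B (the rewrite author's own statement) =====
-- stated objective: idiomatic
-- what changed: Replaced A's preallocated list with paired mirror-writes plus a post-loop center overwrite by a single per-row computation: each row i is produced independently from its center distance k = min(i, n-1-i), and the rows are joined from a generator over range(n).
import Mathlib
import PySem

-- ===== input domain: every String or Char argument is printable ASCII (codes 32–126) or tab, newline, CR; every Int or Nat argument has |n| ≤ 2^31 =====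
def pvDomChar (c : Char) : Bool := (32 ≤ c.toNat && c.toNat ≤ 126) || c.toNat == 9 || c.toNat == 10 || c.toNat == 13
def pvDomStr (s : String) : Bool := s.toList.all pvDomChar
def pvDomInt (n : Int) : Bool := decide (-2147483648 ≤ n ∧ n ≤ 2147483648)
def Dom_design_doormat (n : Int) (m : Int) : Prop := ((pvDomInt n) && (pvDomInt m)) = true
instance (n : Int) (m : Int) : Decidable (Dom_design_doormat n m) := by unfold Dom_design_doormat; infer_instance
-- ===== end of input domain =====

-- B builds each row independently from its center distance (k = min(i, n-1-i)) in one pass,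
-- instead of A's preallocated list with paired mirror-writes and a center overwrite; objective: idiomatic.
-- A mutates no arguments. Where an index assignment would raise in Python (only outside Pre_), pyListSet
-- leaves the list unchanged; '\n'.join over a remaining None (outside Pre_) is rendered via getD [].


-- ===== PORT A =====
-- Python list assignment xs[i] = v (negative-index rule); out-of-range raises IndexError in Python —
-- that happens only outside Pre_, where this helper leaves the list unchanged.
def pyListSet {α : Type} (xs : List α) (i : Int) (v : α) : List α :=
  let j := if i < 0 then i + xs.length else i
  if 0 ≤ j ∧ j < (xs.length : Int) then xs.set j.toNat v else xs

-- 'WELCOME' as chars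
def welcomeChars : List Char := ['W', 'E', 'L', 'C', 'O', 'M', 'E']

-- s.center(w, f): exact port of CPython's padding rule (left = marg//2 + (marg & width & 1))
def pyCenter (s : List Char) (w : Int) (f : Char) : List Char :=
  if w ≤ (s.length : Int) then s
  else
    let marg := w - s.length
    let left := PySem.Int.floordiv marg 2 + ((marg.land w).land 1)
    List.replicate left.toNat f ++ s ++ List.replicate (marg - left).toNat f

-- full_row = ends + middle + ends of A's loop body
def fullRowA (m r : Int) : List Char :=
  let ends := PySem.List.pyRepeat ['-'] (PySem.Int.floordiv (m - 3 * (2 * r + 1)) 2)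
  let middle := PySem.List.pyRepeat ['.', '|', '.'] (2 * r + 1)
  ends ++ middle ++ ends

-- one iteration of A's loop: doormat[row_number] = full_row; doormat[n-(row_number+1)] = full_row
def stepA (n m : Int) (dm : List (Option (List Char))) (r : Int) : List (Option (List Char)) :=
  pyListSet (pyListSet dm r (some (fullRowA m r))) (n - (r + 1)) (some (fullRowA m r))

def design_doormat (n : Int) (m : Int) : String :=
  let doormat0 : List (Option (List Char)) := List.replicate n.toNat none
  let doormat1 := (PySem.List.pyRange 0 (PySem.Int.floordiv n 2) 1).foldl (stepA n m) doormat0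
  let doormat2 := pyListSet doormat1 (PySem.Int.floordiv n 2) (some (pyCenter welcomeChars m '-'))
  String.mk (PySem.Chars.join ['\n'] (doormat2.map (fun o => o.getD [])))

-- ===== PORT B =====
-- Source B's local helper row(i)
def rowAlt (n m i : Int) : List Char :=
  if i = PySem.Int.floordiv n 2 then pyCenter welcomeChars m '-'
  else
    let k := min i (n - 1 - i)
    let ends := PySem.List.pyRepeat ['-'] (PySem.Int.floordiv (m - 3 * (2 * k + 1)) 2)
    ends ++ PySem.List.pyRepeat ['.', '|', '.'] (2 * k + 1) ++ ends

def design_doormat_alt (n : Int) (m : Int) : String :=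
  String.mk (PySem.Chars.join ['\n'] ((PySem.List.pyRange 0 n 1).map (rowAlt n m)))

-- ===== PRECONDITION & SPEC =====
-- A raises IndexError (doormat[n//2] into an empty list) for every n ≤ 0; Pre_ keeps exactly the n ≥ 1 on which A returns.
def Pre_design_doormat (n : Int) (m : Int) : Prop := 1 ≤ n
instance (n : Int) (m : Int) : Decidable (Pre_design_doormat n m) := by unfold Pre_design_doormat; infer_instance
def pvWitness_design_doormat : Int × Int := (7, 21)

def Spec_design_doormat (n : Int) (m : Int) (out : String) : Prop := out = design_doormat_alt n m
instance (n : Int) (m : Int) (out : String) : Decidable (Spec_design_doormat n m out) := by unfold Spec_design_doormat; infer_instance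

-- ===== CLAIM (what is proved, stated in full; the proofs are below) =====
def Claim_equal_design_doormat : Prop := ∀ (n : Int) (m : Int), Dom_design_doormat n m → Pre_design_doormat n m → Spec_design_doormat n m (design_doormat n m)

-- ===== LEMMAS AND PROOFS =====

theorem floordiv_two (n : Int) (h : 0 ≤ n) : PySem.Int.floordiv n 2 = ((n.toNat / 2 : Nat) : Int) := by
  simp [PySem.Int.floordiv, Int.fdiv_eq_ediv]; omega

theorem pyListSet_inrange {α : Type} (xs : List α) (k : Nat) (hk : k < xs.length) (v : α) :
    pyListSet xs (k : Int) v = xs.set k v := by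
  have h0 : ¬ ((k : Int) < 0) := by omega
  have h1 : (0:Int) ≤ (k : Int) ∧ (k : Int) < (xs.length : Int) := ⟨by omega, by omega⟩
  simp [pyListSet, h0, h1]

theorem stepA_eq (n m : Int) (dm : List (Option (List Char))) (hlen : dm.length = n.toNat)
    (k : Nat) (hk : k < n.toNat / 2) :
    stepA n m dm (k : Int) =
      (dm.set k (some (fullRowA m k))).set (n.toNat - 1 - k) (some (fullRowA m k)) := by
  unfold stepA
  rw [pyListSet_inrange dm k (by omega)]
  have h2 : (n - ((k : Int) + 1)) = ((n.toNat - 1 - k : Nat) : Int) := by omega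
  rw [h2, pyListSet_inrange _ _ (by simp [List.length_set]; omega)]

-- invariant of A's fill loop
theorem fold_invariant (n m : Int) (hn : 1 ≤ n) (j : Nat) (hj : j ≤ n.toNat / 2) :
    ((List.range j).foldl (fun dm (k : Nat) => stepA n m dm (k : Int))
        (List.replicate n.toNat (none : Option (List Char)))).length = n.toNat ∧
    ∀ i, i < n.toNat →
      ((List.range j).foldl (fun dm (k : Nat) => stepA n m dm (k : Int))
        (List.replicate n.toNat (none : Option (List Char))))[i]? =
      some (if i < j ∨ n.toNat - j ≤ i then some (fullRowA m (min (i : Int) (n - 1 - i))) else none) := by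
  induction j with
  | zero =>
      constructor
      · simp
      · intro i hi
        simp [List.getElem?_replicate, hi]
        omega
  | succ j ih =>
      have hj' : j ≤ n.toNat / 2 := by omega
      obtain ⟨ihlen, ihget⟩ := ih hj'
      rw [List.range_succ, List.foldl_append]
      simp only [List.foldl_cons, List.foldl_nil]
      rw [stepA_eq n m _ ihlen j (by omega)]
      constructor
      · simp [List.length_set]; exact ihlen
      · intro i hi
        have hminj : fullRowA m (j : Int) = fullRowA m (min (j : Int) (n - 1 - j)) := by
          congr 1; omega
        have hmirror : fullRowA m (j : Int) = fullRowA m (min ((n.toNat - 1 - j : Nat) : Int) (n - 1 - (n.toNat - 1 - j : Nat))) := by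
          congr 1; omega
        rw [List.getElem?_set, List.getElem?_set]
        simp only [List.length_set, ihlen]
        by_cases h1 : n.toNat - 1 - j = i
        · subst h1
          rw [if_pos rfl, if_pos (show n.toNat - 1 - j < n.toNat by omega),
            if_pos (show n.toNat - 1 - j < j + 1 ∨ n.toNat - (j + 1) ≤ n.toNat - 1 - j by omega)]
          rw [hmirror]
        · rw [if_neg h1]
          by_cases h2 : j = i
          · subst h2
            rw [if_pos rfl, if_pos (show j < n.toNat by omega),
              if_pos (show j < j + 1 ∨ n.toNat - (j + 1) ≤ j by omega)]
            rw [hminj]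
          · rw [if_neg h2, ihget i hi]
            have hiff : (i < j + 1 ∨ n.toNat - (j + 1) ≤ i) ↔ (i < j ∨ n.toNat - j ≤ i) := by omega
            simp only [hiff]

theorem rowAlt_ne (n m i : Int) (h : ¬ i = PySem.Int.floordiv n 2) :
    rowAlt n m i = fullRowA m (min i (n - 1 - i)) := by
  unfold rowAlt fullRowA
  rw [if_neg h]

theorem rowAlt_center (n m : Int) (hn : 1 ≤ n)
    (hfd : PySem.Int.floordiv n 2 = ((n.toNat / 2 : Nat) : Int)) :
    rowAlt n m ((n.toNat / 2 : Nat) : Int) = pyCenter welcomeChars m '-' := by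
  unfold rowAlt
  rw [if_pos hfd.symm]

theorem main_lemma : ∀ (n m : Int), 1 ≤ n → design_doormat n m = design_doormat_alt n m := by
  intro n m hn
  have hfd : PySem.Int.floordiv n 2 = ((n.toNat / 2 : Nat) : Int) := floordiv_two n (by omega)
  obtain ⟨hlen, hget⟩ := fold_invariant n m hn (n.toNat / 2) le_rfl
  unfold design_doormat design_doormat_alt
  rw [hfd, PySem.List.pyRange_one, PySem.List.pyRange_one]
  simp only [Int.sub_zero, Int.toNat_natCast, List.foldl_map, zero_add]
  set L := (List.range (n.toNat / 2)).foldl (fun dm (k : Nat) => stepA n m dm (k : Int))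
    (List.replicate n.toNat (none : Option (List Char))) with hL
  rw [pyListSet_inrange L (n.toNat / 2) (by rw [hlen]; omega)]
  have hfinal : L.set (n.toNat / 2) (some (pyCenter welcomeChars m '-')) =
      (List.range n.toNat).map (fun (i : Nat) => some (rowAlt n m (i : Int))) := by
    apply List.ext_getElem?
    intro i
    by_cases hi : i < n.toNat
    · rw [List.getElem?_set]
      simp only [List.length_set, hlen]
      rw [List.getElem?_map, List.getElem?_range hi]
      simp only [Option.map_some]
      by_cases hc : n.toNat / 2 = i
      · subst hc
        rw [if_pos rfl, if_pos (show n.toNat / 2 < n.toNat by omega), rowAlt_center n m hn hfd]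
      · rw [if_neg hc, hget i hi]
        rw [if_pos (show i < n.toNat / 2 ∨ n.toNat - n.toNat / 2 ≤ i by omega)]
        rw [rowAlt_ne n m i (by rw [hfd]; omega)]
    · have h1 : (L.set (n.toNat / 2) (some (pyCenter welcomeChars m '-'))).length ≤ i := by
        simp only [List.length_set, hlen]; omega
      have h2 : ((List.range n.toNat).map (fun (i : Nat) => some (rowAlt n m (i : Int)))).length ≤ i := by
        simp only [List.length_map, List.length_range]; omega
      rw [List.getElem?_eq_none h1, List.getElem?_eq_none h2]
  rw [hfinal]
  simp only [List.map_map]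
  rfl

-- ===== VERDICT (by name: the statement is the Claim_ definition above) =====
theorem design_doormat_spec : Claim_equal_design_doormat := by
  intro n m _ hpre
  exact main_lemma n m hpre
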